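-- pv_equiv track=rewrite | github.com/ydb-platform/ydb | contrib/python/pyhanko-certvalidator/pyhanko_certvalidator/name_trees.py | dns_tree_contains
-- ===== SOURCE A (Python) =====
-- def dns_tree_contains(base: str, other: str):
--     # check if 'other' consists of adding zero or more labels to 'base'
--     #  (from the left)
--     base_labels = base.split('.')
--     other_labels = other.split('.')
--     if len(other_labels) < len(base_labels):
--         return False
--     return len(other_labels) >= len(base_labels) and all(
--         x == y for x, y in zip(reversed(other_labels), reversed(base_labels))
--     )
-- ===== SOURCE B (Python) =====
-- def dns_tree_contains(base: str, other: str):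
--     # 'other' adds zero or more labels to 'base' iff it is equal to base,
--     # or ends with '.' + base (the '.' keeps the match on a label boundary).
--     return other == base or other.endswith('.' + base)
-- ===== Notes on version B (the rewrite author's own statement) =====
-- stated objective: simpler
-- what changed: Replaces the split-into-labels, reverse, zip and all-loop with a single string test: other == base or other.endswith('.' + base).
import Mathlib
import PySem

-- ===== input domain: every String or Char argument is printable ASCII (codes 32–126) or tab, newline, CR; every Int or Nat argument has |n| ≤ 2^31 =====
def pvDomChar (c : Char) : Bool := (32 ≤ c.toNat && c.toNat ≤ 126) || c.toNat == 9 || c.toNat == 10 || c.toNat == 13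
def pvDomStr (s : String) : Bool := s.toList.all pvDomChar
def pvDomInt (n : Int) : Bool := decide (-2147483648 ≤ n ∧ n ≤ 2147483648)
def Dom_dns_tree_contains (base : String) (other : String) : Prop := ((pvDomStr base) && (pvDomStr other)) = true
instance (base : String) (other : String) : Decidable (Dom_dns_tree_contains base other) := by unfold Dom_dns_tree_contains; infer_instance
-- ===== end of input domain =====

-- B replaces the split/reverse/zip/all label loop with one equality-or-endswith string test (objective: simpler).

-- ===== PORT A =====
-- base.split('.') with the non-empty literal separator "." : split? always returns some; getD [] is never taken.
def dns_tree_contains (base : String) (other : String) : Bool :=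
  let base_labels := (PySem.Str.split? base ".").getD []
  let other_labels := (PySem.Str.split? other ".").getD []
  if other_labels.length < base_labels.length then false
  else decide (base_labels.length ≤ other_labels.length)
       && ((other_labels.reverse.zip base_labels.reverse).all fun p => p.1 == p.2)

-- ===== PORT B =====
def dns_tree_contains_alt (base : String) (other : String) : Bool :=
  other == base || PySem.Str.endswith other ("." ++ base)

-- ===== PRECONDITION & SPEC =====
def Spec_dns_tree_contains (base : String) (other : String) (out : Bool) : Prop := out = dns_tree_contains_alt base other
instance (base : String) (other : String) (out : Bool) : Decidable (Spec_dns_tree_contains base other out) := by unfold Spec_dns_tree_contains; infer_instance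

-- ===== CLAIM (what is proved, stated in full; the proofs are below) =====
def Claim_equal_dns_tree_contains : Prop := ∀ (base : String) (other : String), Dom_dns_tree_contains base other → Spec_dns_tree_contains base other (dns_tree_contains base other)

-- ===== LEMMAS AND PROOFS =====

-- A structural single-char split on '.', used to characterise PySem.Chars.splitOn.
def pvSplit : List Char → List (List Char)
  | [] => [[]]
  | c :: rest => if c = '.' then [] :: pvSplit rest else (pvSplit rest).modifyHead (c :: ·)

theorem pvSplit_ne_nil (l : List Char) : pvSplit l ≠ [] := by
  cases l with
  | nil => simp [pvSplit]
  | cons c rest =>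
    simp only [pvSplit]
    split_ifs
    · simp
    · cases h : pvSplit rest with
      | nil => exact absurd h (pvSplit_ne_nil rest)
      | cons a t => simp [List.modifyHead]

theorem go_eq_pvSplit (fuel : Nat) (l cur : List Char) (acc : List (List Char))
    (h : l.length ≤ fuel) :
    PySem.Chars.splitOn.go ['.'] fuel l cur acc
      = acc.reverse ++ (pvSplit l).modifyHead (cur.reverse ++ ·) := by
  induction l generalizing fuel cur acc with
  | nil =>
    cases fuel with
    | zero => simp [PySem.Chars.splitOn.go, pvSplit, List.modifyHead]
    | succ f => simp [PySem.Chars.splitOn.go, pvSplit, List.modifyHead]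
  | cons c rest ih =>
    cases fuel with
    | zero => simp at h
    | succ f =>
      have hf : rest.length ≤ f := by simpa using h
      by_cases hc : c = '.'
      · subst hc
        rw [show PySem.Chars.splitOn.go ['.'] (f+1) ('.' :: rest) cur acc
              = PySem.Chars.splitOn.go ['.'] f rest [] (cur.reverse :: acc) by
            simp [PySem.Chars.splitOn.go, List.isPrefixOf]]
        rw [ih f [] (cur.reverse :: acc) hf]
        simp only [pvSplit, List.modifyHead, List.reverse_cons,
          List.append_assoc, List.cons_append, List.nil_append]
        cases pvSplit rest <;> simp
      · rw [show PySem.Chars.splitOn.go ['.'] (f+1) (c :: rest) cur acc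
              = PySem.Chars.splitOn.go ['.'] f rest (c :: cur) acc by
            simp [PySem.Chars.splitOn.go, List.isPrefixOf, Ne.symm hc]]
        rw [ih f (c :: cur) acc hf]
        cases hrest : pvSplit rest with
        | nil => exact absurd hrest (pvSplit_ne_nil rest)
        | cons a t => simp [pvSplit, hc, hrest, List.modifyHead]

theorem splitOn_eq_pvSplit (l : List Char) : PySem.Chars.splitOn l ['.'] = pvSplit l := by
  have := go_eq_pvSplit (l.length + 1) l [] [] (by omega)
  rw [PySem.Chars.splitOn] at *
  cases h : pvSplit l with
  | nil => exact absurd h (pvSplit_ne_nil l)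
  | cons a t => simpa [h, List.modifyHead] using this

-- join with '.' — the inverse of pvSplit
def pvJoin : List (List Char) → List Char
  | [] => []
  | [x] => x
  | x :: y :: t => x ++ '.' :: pvJoin (y :: t)

theorem pvJoin_pvSplit (l : List Char) : pvJoin (pvSplit l) = l := by
  induction l with
  | cons c rest ih =>
    cases hrest : pvSplit rest with
    | nil => exact absurd hrest (pvSplit_ne_nil rest)
    | cons a t =>
      rw [hrest] at ih
      by_cases hc : c = '.'
      · subst hc
        simp [pvSplit, hrest, pvJoin, ih]
      · cases t with
        | nil =>
          simp only [pvSplit, if_neg hc, hrest, List.modifyHead, pvJoin] at ih ⊢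
          simp [ih]
        | cons b t' =>
          simp only [pvSplit, if_neg hc, hrest, List.modifyHead, pvJoin] at ih ⊢
          simp [ih]
  | nil => simp [pvSplit, pvJoin]

theorem pvJoin_append (xs ys : List (List Char)) (hx : xs ≠ []) (hy : ys ≠ []) :
    pvJoin (xs ++ ys) = pvJoin xs ++ '.' :: pvJoin ys := by
  induction xs with
  | nil => exact absurd rfl hx
  | cons a t ih =>
    cases t with
    | nil => cases ys with
      | nil => exact absurd rfl hy
      | cons b t' => simp [pvJoin]
    | cons b t' =>
      have h2 := ih (by simp)
      simp only [List.cons_append] at h2 ⊢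
      simp only [pvJoin]
      rw [h2]
      simp

theorem pvSplit_append (u v : List Char) :
    pvSplit (u ++ '.' :: v) = pvSplit u ++ pvSplit v := by
  induction u with
  | nil => simp [pvSplit]
  | cons c rest ih =>
    by_cases hc : c = '.'
    · subst hc; simp [pvSplit, ih]
    · cases hrest : pvSplit rest with
      | nil => exact absurd hrest (pvSplit_ne_nil rest)
      | cons a t => simp [pvSplit, hc, ih, hrest, List.modifyHead]

-- the heart: label-list suffix ↔ equality or '.'-boundary suffix
theorem pvSplit_suffix_iff (b o : List Char) :
    pvSplit b <:+ pvSplit o ↔ (o = b ∨ '.' :: b <:+ o) := by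
  constructor
  · rintro ⟨pre, hpre⟩
    cases pre with
    | nil =>
      left
      have : pvJoin (pvSplit o) = pvJoin (pvSplit b) := by rw [← hpre]; simp
      simpa [pvJoin_pvSplit] using this
    | cons a t =>
      right
      have h1 : pvJoin ((a :: t) ++ pvSplit b)
          = pvJoin (a :: t) ++ '.' :: pvJoin (pvSplit b) :=
        pvJoin_append _ _ (by simp) (pvSplit_ne_nil b)
      refine ⟨pvJoin (a :: t), ?_⟩
      have := congrArg pvJoin hpre
      rw [h1, pvJoin_pvSplit, pvJoin_pvSplit] at this
      simpa using this
  · rintro (rfl | ⟨u, hu⟩)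
    · exact List.suffix_refl _
    · exact ⟨pvSplit u, by rw [← hu, pvSplit_append]⟩

-- reversed-zip all-equal ↔ prefix, given the length condition
theorem zip_all_iff_prefix (xs ys : List (List Char)) (h : ys.length ≤ xs.length) :
    (((xs.zip ys).all fun p => p.1 == p.2) = true) ↔ ys <+: xs := by
  induction ys generalizing xs with
  | nil => simp
  | cons y yt ih =>
    cases xs with
    | nil => simp at h
    | cons x xt =>
      simp only [List.zip_cons_cons, List.all_cons, Bool.and_eq_true, beq_iff_eq,
        List.cons_prefix_cons]
      constructor
      · rintro ⟨h1, h2⟩; exact ⟨h1.symm, (ih xt (by simpa using h)).1 h2⟩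
      · rintro ⟨h1, h2⟩; exact ⟨h1.symm, (ih xt (by simpa using h)).2 h2⟩

theorem split?_dot (s : String) :
    (PySem.Str.split? s ".").getD []
      = (PySem.Chars.splitOn s.toList ['.']).map String.ofList := by
  rw [PySem.Str.split?]
  simp [PySem.Chars.split?, PySem.Chars.splitOn]

theorem main_eq (base other : String) :
    dns_tree_contains base other = dns_tree_contains_alt base other := by
  rw [dns_tree_contains, dns_tree_contains_alt]
  simp only [split?_dot, splitOn_eq_pvSplit]
  set b := base.toList with hb
  set o := other.toList with ho
  have hlen : ∀ (l : List Char), ((pvSplit l).map String.ofList).length = (pvSplit l).length := by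
    simp
  have hinj : ∀ x y : List Char, (String.ofList x == String.ofList y) = (x == y) := by
    intro x y
    by_cases h : x = y
    · simp [h]
    · have hne : String.ofList x ≠ String.ofList y := by
        intro he; exact h (by simpa using congrArg String.toList he)
      simp [h, hne]
  have hzip : ((((pvSplit o).map String.ofList).reverse.zip ((pvSplit b).map String.ofList).reverse).all
        fun p => p.1 == p.2)
      = (((pvSplit o).reverse.zip ((pvSplit b).reverse)).all fun p => p.1 == p.2) := by
    have key : ∀ (l : List (List Char × List Char)),
        ((l.map (Prod.map String.ofList String.ofList)).all fun p => p.1 == p.2)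
          = (l.all fun p => p.1 == p.2) := by
      intro l
      induction l with
      | nil => rfl
      | cons p t iht => cases p; simp [hinj, iht]
    rw [← List.map_reverse, ← List.map_reverse, List.zip_map]
    exact key _
  have h1 : (other == base) = decide (o = b) := by
    by_cases h : o = b
    · have : other = base := by simpa [hb, ho] using congrArg String.ofList h
      simp [this, h]
    · have hne : other ≠ base := by
        intro he; exact h (by simp [hb, ho, he])
      simp [hne, h]
  have h2 : PySem.Str.endswith other ("." ++ base) = decide ('.' :: b <:+ o) := by
    rw [PySem.Str.endswith_eq, show ("." ++ base).toList = '.' :: b by simp [hb], ← ho]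
    cases hE : PySem.Chars.endswith o ('.' :: b) with
    | true => simp [(PySem.Chars.endswith_iff o ('.' :: b)).1 hE]
    | false =>
      have hns : ¬ '.' :: b <:+ o := by
        intro hs
        have := (PySem.Chars.endswith_iff o ('.' :: b)).2 hs
        rw [hE] at this
        exact Bool.false_ne_true this
      simp [hns]
  have hB : (other == base || PySem.Str.endswith other ("." ++ base))
      = decide (o = b ∨ '.' :: b <:+ o) := by
    rw [h1, h2]
    by_cases ha : o = b <;> by_cases hc : '.' :: b <:+ o <;> simp [ha, hc]
  have hRHS : decide (o = b ∨ '.' :: b <:+ o) = decide (pvSplit b <:+ pvSplit o) := by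
    rw [decide_eq_decide]
    exact (pvSplit_suffix_iff b o).symm
  rw [hlen, hlen, hzip, hB, hRHS]
  by_cases hl : (pvSplit o).length < (pvSplit b).length
  · have hns : ¬ pvSplit b <:+ pvSplit o := by
      intro hsuf
      have := hsuf.length_le
      omega
    simp [hl, hns]
  · have hle : (pvSplit b).length ≤ (pvSplit o).length := by omega
    have hle' : (pvSplit b).reverse.length ≤ (pvSplit o).reverse.length := by simpa using hle
    simp only [if_neg hl, hle, decide_true, Bool.true_and]
    by_cases hsuf : pvSplit b <:+ pvSplit o
    · have hpre : (pvSplit b).reverse <+: (pvSplit o).reverse := List.reverse_prefix.2 hsuf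
      simp [(zip_all_iff_prefix _ _ hle').2 hpre, hsuf]
    · have hnp : ¬ (pvSplit b).reverse <+: (pvSplit o).reverse := by
        intro hpre
        exact hsuf (List.reverse_prefix.1 hpre)
      cases hA : (((pvSplit o).reverse.zip (pvSplit b).reverse).all fun p => p.1 == p.2) with
      | true => exact absurd ((zip_all_iff_prefix _ _ hle').1 hA) hnp
      | false => simp [hsuf]

-- ===== VERDICT (by name: the statement is the Claim_ definition above) =====
theorem dns_tree_contains_spec : Claim_equal_dns_tree_contains := by
  intro base other _
  unfold Spec_dns_tree_contains
  exact main_eq base other
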